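-- pv_equiv track=rewrite | github.com/DavidArmendariz/advanced-python-skills-course | solutions/solution_learning_the_words_in_a_strange_order.py | learning_words
-- ===== SOURCE A (Python) =====
-- def learning_words(list_of_words):
--     words = dict()
--     # words = {4: ["west", "size", "yard", "word", "town"], 3: ["tax", "sea", "use"], 5: ["think"]}
--     result = []
--     for word in list_of_words:
--         length = len(word)
--         words[length] = words.get(length, []) + [word]
--     for length in sorted(words):
--         # length = 3
--         # words[length] = ["tax", "sea", "use"]
--         # -> ["xat", "aes", "esu"]
--         # -> ["aes", "esu", "xat"]
--         # -> ["sea", "use", "tax"]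
--         for word in sorted([x[::-1] for x in words[length]]):
--             result.append(word[::-1])
--     return result
-- ===== SOURCE B (Python) =====
-- def learning_words(list_of_words):
--     return sorted(list_of_words, key=lambda word: (len(word), word[::-1]))
-- ===== Notes on version B (the rewrite author's own statement) =====
-- stated objective: faster
-- what changed: Replaced the dict-grouping by length plus a per-group sort over reversed spellings with a single sorted() call over all words using the composite key (len(word), word[::-1]).
import Mathlib
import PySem

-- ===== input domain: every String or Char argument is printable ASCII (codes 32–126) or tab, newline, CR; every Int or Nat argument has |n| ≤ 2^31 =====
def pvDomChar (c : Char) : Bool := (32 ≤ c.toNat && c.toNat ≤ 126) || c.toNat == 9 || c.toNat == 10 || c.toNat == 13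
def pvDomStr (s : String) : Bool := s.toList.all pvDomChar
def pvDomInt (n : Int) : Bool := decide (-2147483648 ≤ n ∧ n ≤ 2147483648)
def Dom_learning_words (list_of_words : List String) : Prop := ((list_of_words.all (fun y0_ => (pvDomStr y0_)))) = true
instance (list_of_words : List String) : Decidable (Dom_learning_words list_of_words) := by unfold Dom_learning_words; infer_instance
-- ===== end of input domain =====

-- B replaces A's group-by-length dict plus per-group sort of reversed spellings by ONE
-- sort of the whole list with the composite key (len(word), word[::-1]) — same value, measured faster (A rebuilds group lists by concatenation).

-- ===== PORT A =====
-- s[::-1] — equals PySem.Str.slice? s none none (-1) by PySem.Str.slice?_none_none_neg_one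
def pyRevStr (s : String) : String := String.ofList s.toList.reverse

def learning_words (list_of_words : List String) : List String :=
  -- words[length] = words.get(length, []) + [word]
  let words : PySem.Dict Int (List String) := list_of_words.foldl
    (fun d word => d.insert (PySem.Str.len word) (d.getD (PySem.Str.len word) [] ++ [word]))
    PySem.Dict.empty
  -- for length in sorted(words): for word in sorted([x[::-1] for x in words[length]]): result.append(word[::-1])
  -- (words[length]: length is always a key here, so KeyError never fires; getD [] is its value)
  (PySem.List.sorted words.keys (fun k => k)).foldl
    (fun result length =>
      (PySem.List.sorted ((words.getD length []).map (fun x => pyRevStr x)) (fun w => w)).foldl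
        (fun result word => result ++ [pyRevStr word]) result)
    []

-- ===== PORT B =====
def learning_words_alt (list_of_words : List String) : List String :=
  PySem.List.sorted2 list_of_words (fun word => PySem.Str.len word) (fun word => pyRevStr word)

-- ===== PRECONDITION & SPEC =====
def Spec_learning_words (list_of_words : List String) (out : List String) : Prop := out = learning_words_alt list_of_words
instance (list_of_words : List String) (out : List String) : Decidable (Spec_learning_words list_of_words out) := by unfold Spec_learning_words; infer_instance

-- ===== CLAIM (what is proved, stated in full; the proofs are below) =====
def Claim_equal_learning_words : Prop := ∀ (list_of_words : List String), Dom_learning_words list_of_words → Spec_learning_words list_of_words (learning_words list_of_words)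

-- ===== LEMMAS AND PROOFS =====

-- the composite sort key both programs realise: (length, reversed spelling), lexicographic
def pvKey (w : String) : Lex (Int × String) := toLex (PySem.Str.len w, pyRevStr w)

-- Python's tuple comparison (sorted2's comparator) is '<' on the lexicographic pair
theorem cmp_lex {α κ₁ κ₂ : Type} [LinearOrder κ₁] [LinearOrder κ₂] (k1 : α → κ₁) (k2 : α → κ₂) (a b : α) :
    (decide (k1 a < k1 b) || (!decide (k1 b < k1 a) && decide (k2 a < k2 b)))
      = decide (toLex (k1 a, k2 a) < toLex (k1 b, k2 b)) := by
  rcases lt_trichotomy (k1 a) (k1 b) with h | h | h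
  · simp [Prod.Lex.lt_iff, h]
  · simp [Prod.Lex.lt_iff, h]
  · simp only [Prod.Lex.lt_iff, ofLex_toLex]
    simp [not_lt_of_gt h, h, ne_of_gt h]

-- the grouping fold: the entry at L collects, in order, exactly the words of length L
theorem getD_group_loop {α : Type} [DecidableEq α] (f : α → Int) (l : List α)
    (d : PySem.Dict Int (List α)) (L : Int) :
    (l.foldl (fun d w => d.insert (f w) (d.getD (f w) [] ++ [w])) d).getD L []
      = d.getD L [] ++ l.filter (fun w => f w == L) := by
  induction l generalizing d with
  | nil => simp
  | cons w t ih =>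
    rw [List.foldl_cons, ih, PySem.Dict.getD_insert, List.filter_cons]
    by_cases h : L = f w
    · rw [if_pos h, if_pos (beq_iff_eq.mpr h.symm), ← h, List.append_assoc]
      rfl
    · rw [if_neg h, if_neg (by simp [beq_iff_eq]; exact Ne.symm h)]

theorem count_flatMap_filter {α : Type} [DecidableEq α] (f : α → Int) (xs : List α)
    (a : α) (K : List Int) (hnd : K.Nodup) :
    (K.flatMap (fun L => xs.filter (fun w => f w == L))).count a
      = if f a ∈ K then xs.count a else 0 := by
  induction K with
  | nil => simp
  | cons L t ih =>
    have hndt := (List.nodup_cons.mp hnd).2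
    have hLt := (List.nodup_cons.mp hnd).1
    rw [List.flatMap_cons, List.count_append, ih hndt]
    by_cases h : f a = L
    · rw [List.count_filter (p := fun w => f w == L) (l := xs) (beq_iff_eq.mpr h),
        if_neg (by rw [h]; exact hLt),
        if_pos (by rw [h]; exact List.mem_cons_self), Nat.add_zero]
    · have h0 : (xs.filter (fun w => f w == L)).count a = 0 :=
        List.count_eq_zero.mpr (fun hmem => h (beq_iff_eq.mp (List.mem_filter.mp hmem).2))
      rw [h0, Nat.zero_add]
      by_cases hm : f a ∈ t
      · rw [if_pos hm, if_pos (List.mem_cons_of_mem _ hm)]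
      · rw [if_neg hm, if_neg (by simp [List.mem_cons, h, hm])]

-- the keys of the grouping fold are the distinct lengths in first-occurrence order
theorem keys_group_loop (xs : List String) :
    (xs.foldl (fun d word => d.insert (PySem.Str.len word)
        (d.getD (PySem.Str.len word) [] ++ [word])) PySem.Dict.empty).keys
      = PySem.Set.ofList (xs.map PySem.Str.len) := by
  rw [PySem.Dict.keys_foldl_insert_key]
  simp [PySem.Dict.keys_empty, PySem.Set.update, PySem.Set.ofList_eq_foldl]

-- A written as a flatMap over the sorted distinct lengths
theorem learning_words_eq_flatMap (xs : List String) :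
    learning_words xs =
      (PySem.List.sorted (PySem.Set.ofList (xs.map PySem.Str.len)) (fun k => k)).flatMap
        (fun L => (PySem.List.sorted ((xs.filter (fun w => PySem.Str.len w == L)).map pyRevStr)
            (fun w => w)).map pyRevStr) := by
  show (PySem.List.sorted (xs.foldl (fun d word => d.insert (PySem.Str.len word)
        (d.getD (PySem.Str.len word) [] ++ [word])) PySem.Dict.empty).keys (fun k => k)).foldl _ [] = _
  rw [keys_group_loop]
  have h1 : (PySem.List.sorted (PySem.Set.ofList (xs.map PySem.Str.len)) (fun k => k)).foldl
      (fun result length =>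
        (PySem.List.sorted (((xs.foldl (fun d word => d.insert (PySem.Str.len word)
            (d.getD (PySem.Str.len word) [] ++ [word])) PySem.Dict.empty).getD length []).map
            (fun x => pyRevStr x)) (fun w => w)).foldl
          (fun result word => result ++ [pyRevStr word]) result) []
    = (PySem.List.sorted (PySem.Set.ofList (xs.map PySem.Str.len)) (fun k => k)).foldl
      (fun res L => res ++
        (PySem.List.sorted ((xs.filter (fun w => PySem.Str.len w == L)).map pyRevStr)
          (fun w => w)).map pyRevStr) [] := by
    refine PySem.List.foldl_congr_mem _ _ _ _ ?_
    intro acc L _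
    rw [PySem.List.foldl_append_singleton_eq_map, getD_group_loop]
    simp [PySem.Dict.getD_empty]
  rw [h1, PySem.List.foldl_append_eq_flatMap]
  simp

theorem pyRevStr_pyRevStr (s : String) : pyRevStr (pyRevStr s) = s := by
  simp [pyRevStr]

theorem pyRevStr_injective : Function.Injective pyRevStr := by
  intro a b h
  have := congrArg pyRevStr h
  simpa [pyRevStr_pyRevStr] using this

theorem len_pyRevStr (s : String) : PySem.Str.len (pyRevStr s) = PySem.Str.len s := by
  simp [pyRevStr, PySem.Str.len]

theorem pvKey_injective : Function.Injective pvKey := by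
  intro a b h
  have h2 : pyRevStr a = pyRevStr b := congrArg (fun p => (ofLex p).2) h
  exact pyRevStr_injective h2

-- a nodup list of lengths covering xs's lengths partitions xs (as a multiset)
theorem flatMap_filter_perm (xs : List String) (K : List Int) (hnd : K.Nodup)
    (hcov : ∀ w ∈ xs, PySem.Str.len w ∈ K) :
    (K.flatMap (fun L => xs.filter (fun w => PySem.Str.len w == L))).Perm xs := by
  rw [List.perm_iff_count]
  intro a
  rw [count_flatMap_filter]
  · by_cases hm : PySem.Str.len a ∈ K
    · rw [if_pos hm]
    · rw [if_neg hm, Eq.comm, List.count_eq_zero]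
      exact fun hax => hm (hcov a hax)
  · exact hnd

-- A's output is a permutation of the input
theorem learning_words_perm (xs : List String) : (learning_words xs).Perm xs := by
  rw [learning_words_eq_flatMap]
  have h2 : ∀ L : Int,
      ((PySem.List.sorted ((xs.filter (fun w => PySem.Str.len w == L)).map pyRevStr)
          (fun w => w)).map pyRevStr).Perm (xs.filter (fun w => PySem.Str.len w == L)) := by
    intro L
    have := (PySem.List.sorted_perm ((xs.filter (fun w => PySem.Str.len w == L)).map pyRevStr)
      (fun w => w) false).map pyRevStr
    rw [List.map_map] at this
    simpa [Function.comp_def, pyRevStr_pyRevStr] using this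
  have hperm := List.Perm.flatMap
    (g := fun L => xs.filter (fun w => PySem.Str.len w == L))
    (PySem.List.sorted_perm (PySem.Set.ofList (xs.map PySem.Str.len)) (fun k => k) false)
    (fun L _ => h2 L)
  exact hperm.trans (flatMap_filter_perm xs _ (PySem.Set.nodup_ofList _)
    (fun w hw => by rw [PySem.Set.mem_ofList]; exact List.mem_map_of_mem hw))

-- every word emitted for length L has length L
theorem len_of_mem_group (xs : List String) (L : Int) (x : String)
    (hx : x ∈ (PySem.List.sorted ((xs.filter (fun w => PySem.Str.len w == L)).map pyRevStr)
        (fun w => w)).map pyRevStr) : PySem.Str.len x = L := by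
  obtain ⟨u, hu, rfl⟩ := List.mem_map.mp hx
  rw [PySem.List.mem_sorted] at hu
  obtain ⟨y, hy, rfl⟩ := List.mem_map.mp hu
  rw [len_pyRevStr, len_pyRevStr]
  exact beq_iff_eq.mp (List.mem_filter.mp hy).2

-- A's output is pairwise nondecreasing in the composite key
theorem learning_words_pairwise (xs : List String) :
    (learning_words xs).Pairwise (fun a b => pvKey a ≤ pvKey b) := by
  rw [learning_words_eq_flatMap, List.flatMap_def, List.pairwise_flatten]
  constructor
  · intro l hl
    obtain ⟨L, _, rfl⟩ := List.mem_map.mp hl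
    have hp := PySem.List.sorted_pairwise
      ((xs.filter (fun w => PySem.Str.len w == L)).map pyRevStr) (fun w => w)
    rw [List.pairwise_map]
    refine hp.imp_of_mem ?_
    intro u v hu hv huv
    have hlu : PySem.Str.len (pyRevStr u) = L := by
      rw [len_pyRevStr]
      obtain ⟨y, hy, rfl⟩ := List.mem_map.mp ((PySem.List.mem_sorted _ _ _ _).mp hu)
      rw [len_pyRevStr]
      exact beq_iff_eq.mp (List.mem_filter.mp hy).2
    have hlv : PySem.Str.len (pyRevStr v) = L := by
      rw [len_pyRevStr]
      obtain ⟨y, hy, rfl⟩ := List.mem_map.mp ((PySem.List.mem_sorted _ _ _ _).mp hv)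
      rw [len_pyRevStr]
      exact beq_iff_eq.mp (List.mem_filter.mp hy).2
    show pvKey (pyRevStr u) ≤ pvKey (pyRevStr v)
    rw [pvKey, pvKey, Prod.Lex.le_iff]
    right
    refine ⟨?_, ?_⟩
    · show PySem.Str.len (pyRevStr u) = PySem.Str.len (pyRevStr v)
      rw [hlu, hlv]
    · simpa [pyRevStr_pyRevStr] using huv
  · have hK := PySem.List.sorted_ofList_pairwise_lt (xs.map PySem.Str.len)
    rw [List.pairwise_map]
    refine hK.imp_of_mem ?_
    intro L L' _ _ hLL x hx y hy
    rw [pvKey, pvKey, Prod.Lex.le_iff]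
    left
    rw [len_of_mem_group xs L x hx, len_of_mem_group xs L' y hy]
    exact hLL

-- B is the key-sort: sorted2's comparator is '<' on the lexicographic pair key
theorem alt_eq_sorted_key (xs : List String) :
    learning_words_alt xs = PySem.List.sorted xs pvKey := by
  rw [PySem.List.sorted_eq_foldl_insertBy]
  show xs.foldl (fun acc x => PySem.List.insertBy
      (fun a b => decide (PySem.Str.len a < PySem.Str.len b) ||
        (!decide (PySem.Str.len b < PySem.Str.len a) && decide (pyRevStr a < pyRevStr b))) x acc) []
    = _
  have hc : (fun (a b : String) => decide (PySem.Str.len a < PySem.Str.len b) ||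
      (!decide (PySem.Str.len b < PySem.Str.len a) && decide (pyRevStr a < pyRevStr b)))
      = fun a b => decide (pvKey a < pvKey b) := by
    funext a b
    exact cmp_lex (fun w => PySem.Str.len w) (fun w => pyRevStr w) a b
  rw [hc]

theorem alt_pairwise (xs : List String) :
    (learning_words_alt xs).Pairwise (fun a b => pvKey a ≤ pvKey b) := by
  rw [alt_eq_sorted_key]
  exact PySem.List.sorted_pairwise xs pvKey

theorem alt_perm (xs : List String) : (learning_words_alt xs).Perm xs := by
  rw [alt_eq_sorted_key]; exact PySem.List.sorted_perm _ _ _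

-- ===== VERDICT (by name: the statement is the Claim_ definition above) =====
theorem learning_words_spec : Claim_equal_learning_words := by
  intro xs _
  unfold Spec_learning_words
  exact PySem.List.eq_of_perm_of_pairwise_le_of_injective pvKey pvKey_injective
    ((learning_words_perm xs).trans (alt_perm xs).symm)
    (learning_words_pairwise xs) (alt_pairwise xs)
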